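-- pv_equiv track=rewrite | github.com/City-of-Helsinki/hauki | hours/importer/kirjastot.py | get_weekday_pattern_candidate
-- ===== SOURCE A (Python) =====
-- def get_weekday_pattern_candidate(
--     weekday_openings_by_date: list, n: int, period_id: int
-- ) -> list:
--     """
--     Returns the pattern for n consecutive weeks from weekday_openings_by_date,
--     merging data from several repetitions to find all n weeks with period_id.
--     """
--     first_n_weeks = weekday_openings_by_date[0:n]
--     weeks_to_return = []
--     for index, weekly_opening in enumerate(first_n_weeks):
--         try:
--             round = 0
--             while weekly_opening["period"] != period_id:
--                 # this opening won't do, looking at the next repetition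
--                 round += 1
--                 weekly_opening = weekday_openings_by_date[round * n + index]
--         except IndexError:
--             # period doesn't contain a single opening for this weekday
--             weekly_opening = None
--         weeks_to_return.append(weekly_opening)
--     return weeks_to_return
-- ===== SOURCE B (Python) =====
-- def get_weekday_pattern_candidate(
--     weekday_openings_by_date: list, n: int, period_id: int
-- ) -> list:
--     """Single row-major pass: bucket entries by index modulo n, first match wins per column."""
--     if n <= 0:
--         return []
--     num_columns = min(len(weekday_openings_by_date), n)
--     result = [None] * num_columns
--     filled = [False] * num_columns
--     for i, opening in enumerate(weekday_openings_by_date):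
--         col = i % n
--         if not filled[col] and opening["period"] == period_id:
--             result[col] = opening
--             filled[col] = True
--     return result
-- ===== Notes on version B (the rewrite author's own statement) =====
-- stated objective: simpler
-- what changed: Replaced the per-column while-loop with try/except IndexError and round*n+index arithmetic by a single row-major pass that buckets entries by index modulo n with first-match-wins per column.
-- outside the precondition, e.g. on get_weekday_pattern_candidate([{'period': 1}, {'period': 1}], -1, 1): A returns [{'period': 1}], B returns []; on get_weekday_pattern_candidate([{'period': 1}, {'x': 0}], 1, 1): A returns [{'period': 1}], B returns [{'period': 1}]
import Mathlib
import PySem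

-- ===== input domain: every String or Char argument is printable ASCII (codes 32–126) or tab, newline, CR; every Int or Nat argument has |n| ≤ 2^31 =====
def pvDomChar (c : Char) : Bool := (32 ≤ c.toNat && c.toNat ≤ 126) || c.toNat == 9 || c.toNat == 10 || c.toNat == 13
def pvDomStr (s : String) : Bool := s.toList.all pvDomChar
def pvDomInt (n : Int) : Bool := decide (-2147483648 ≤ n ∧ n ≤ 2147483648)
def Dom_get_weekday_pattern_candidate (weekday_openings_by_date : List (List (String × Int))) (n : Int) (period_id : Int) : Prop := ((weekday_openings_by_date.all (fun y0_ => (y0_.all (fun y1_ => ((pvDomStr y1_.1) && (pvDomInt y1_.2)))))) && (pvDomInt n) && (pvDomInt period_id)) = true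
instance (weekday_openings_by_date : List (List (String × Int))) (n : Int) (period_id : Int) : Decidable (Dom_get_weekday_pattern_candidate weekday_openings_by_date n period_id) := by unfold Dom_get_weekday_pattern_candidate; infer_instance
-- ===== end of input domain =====

-- ===== PORT A =====
-- B replaces A's per-column while/try-IndexError repetition scan by one row-major pass
-- bucketing entries by index mod n, first match per column (objective: simpler).
-- Shared dict read: w["period"]. Where the key is missing Python raises KeyError; such inputs
-- are excluded by Pre_, here we return the sentinel period_id+1, which never equals period_id.
def pvPeriod (w : List (String × Int)) (period_id : Int) : Int :=
  (PySem.Dict.mk w).getD "period" (period_id + 1)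

-- the inner 'while weekly_opening["period"] != period_id' loop; fuel (called with
-- weekday_openings_by_date.length + 1) only pads termination: with 0 < n the accessed index
-- round*n+index strictly grows, so the loop runs at most length+1 times.
def pvWhileA (xs : List (List (String × Int))) (n : Int) (index : Int) (period_id : Int) :
    List (String × Int) → Nat → Nat → Option (List (String × Int))
  | _, _, 0 => none
  | w, round, fuel + 1 =>
    if pvPeriod w period_id ≠ period_id then
      match PySem.List.pyGet? xs (((round : Int) + 1) * n + index) with
      | none => none  -- IndexError: weekly_opening = None
      | some w' => pvWhileA xs n index period_id w' (round + 1) fuel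
    else some w

def get_weekday_pattern_candidate (weekday_openings_by_date : List (List (String × Int))) (n : Int) (period_id : Int) : List (Option (List (String × Int))) :=
  let first_n_weeks := PySem.List.slice weekday_openings_by_date (some 0) (some n)
  (PySem.List.enumerate first_n_weeks).foldl
    (fun weeks_to_return p =>
      weeks_to_return ++ [pvWhileA weekday_openings_by_date n p.1 period_id p.2 0
        (weekday_openings_by_date.length + 1)]) []

-- ===== PORT B =====
def pvStepB (n period_id : Int) (st : List (Option (List (String × Int))) × List Bool)
    (p : Int × List (String × Int)) : List (Option (List (String × Int))) × List Bool :=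
  let col := (PySem.Int.mod p.1 n).toNat
  if st.2.getD col false = false ∧ pvPeriod p.2 period_id = period_id then
    (st.1.set col (some p.2), st.2.set col true)
  else st

def get_weekday_pattern_candidate_alt (weekday_openings_by_date : List (List (String × Int))) (n : Int) (period_id : Int) : List (Option (List (String × Int))) :=
  if n ≤ 0 then []
  else
    let num_columns := min weekday_openings_by_date.length n.toNat
    ((PySem.List.enumerate weekday_openings_by_date).foldl (pvStepB n period_id)
      (List.replicate num_columns none, List.replicate num_columns false)).1

-- ===== PRECONDITION & SPEC =====
-- Pre_ keeps the natural domain n >= 0 (A's value for a negative week count n with a nonempty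
-- slice xs[0:n] comes from negative slicing and negative-index wraparound, outside the
-- function's purpose; see claim cites; negative n whose slice is empty is kept: both return [])
-- and, for n > 0, requires every dict to carry the "period" key: A raises KeyError on every
-- dict it reads without it.  This is slightly narrower than exact: dicts A never reads
-- (past a match in their column) could lack the key; A and B return the same value there.
def Pre_get_weekday_pattern_candidate (weekday_openings_by_date : List (List (String × Int))) (n : Int) (period_id : Int) : Prop :=
  (0 ≤ n ∧ (n = 0 ∨ ∀ w ∈ weekday_openings_by_date, w.any (fun kv => kv.1 == "period")))
    ∨ (n < 0 ∧ (weekday_openings_by_date.length : Int) + n ≤ 0)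
instance (weekday_openings_by_date : List (List (String × Int))) (n : Int) (period_id : Int) : Decidable (Pre_get_weekday_pattern_candidate weekday_openings_by_date n period_id) := by unfold Pre_get_weekday_pattern_candidate; infer_instance

def pvWitness_get_weekday_pattern_candidate : (List (List (String × Int))) × Int × Int :=
  ([[("period", 1)], [("period", 2)], [("period", 1)]], 2, 1)

def Spec_get_weekday_pattern_candidate (weekday_openings_by_date : List (List (String × Int))) (n : Int) (period_id : Int) (out : List (Option (List (String × Int)))) : Prop := out = get_weekday_pattern_candidate_alt weekday_openings_by_date n period_id
instance (weekday_openings_by_date : List (List (String × Int))) (n : Int) (period_id : Int) (out : List (Option (List (String × Int)))) : Decidable (Spec_get_weekday_pattern_candidate weekday_openings_by_date n period_id out) := by unfold Spec_get_weekday_pattern_candidate; infer_instance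

-- ===== CLAIM (what is proved, stated in full; the proofs are below) =====
def Claim_equal_get_weekday_pattern_candidate : Prop := ∀ (weekday_openings_by_date : List (List (String × Int))) (n : Int) (period_id : Int), Dom_get_weekday_pattern_candidate weekday_openings_by_date n period_id → Pre_get_weekday_pattern_candidate weekday_openings_by_date n period_id → Spec_get_weekday_pattern_candidate weekday_openings_by_date n period_id (get_weekday_pattern_candidate weekday_openings_by_date n period_id)

-- ===== LEMMAS AND PROOFS =====
-- Both sides are shown equal, entry by entry, to pvF xs nn col: the first entry matching
-- period_id among the column-col entries xs[col], xs[nn+col], xs[2*nn+col], ...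
def pvMatch (period_id : Int) (w : List (String × Int)) : Bool := pvPeriod w period_id == period_id

def pvCol (xs : List (List (String × Int))) (nn col : Nat) : List (List (String × Int)) :=
  ((xs.zipIdx).filter (fun p => p.2 % nn == col)).map (·.1)

def pvF (xs : List (List (String × Int))) (nn col : Nat) (period_id : Int) : Option (List (String × Int)) :=
  (pvCol xs nn col).find? (pvMatch period_id)

lemma pvCol_append_singleton (xs : List (List (String × Int))) (w : List (String × Int)) (nn col : Nat) :
    pvCol (xs ++ [w]) nn col = pvCol xs nn col ++ (if xs.length % nn == col then [w] else []) := by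
  simp only [pvCol, List.zipIdx_append, List.filter_append, List.map_append]
  congr 1
  by_cases h : xs.length % nn == col <;> simp [h]

lemma pvCol_getElem? (xs : List (List (String × Int))) (nn col : Nat) (hcol : col < nn) (r : Nat) :
    (pvCol xs nn col)[r]? = xs[r * nn + col]? := by
  induction xs using List.reverseRecOn generalizing r with
  | nil => simp [pvCol]
  | append_singleton xs w ih =>
    rw [pvCol_append_singleton]
    rcases Nat.lt_trichotomy (r * nn + col) xs.length with hi | hi | hi
    · have hr : r < (pvCol xs nn col).length := by
        have h1 := ih r
        rw [List.getElem?_eq_getElem hi] at h1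
        exact (List.getElem?_eq_some_iff.mp h1).1
      rw [List.getElem?_append_left hr, List.getElem?_append_left hi, ih]
    · have hc : (xs.length % nn == col) = true := by
        rw [← hi]; simp [Nat.mod_eq_of_lt hcol]
      have h1 : (pvCol xs nn col)[r]? = none := by
        rw [ih r, hi]; exact List.getElem?_eq_none (Nat.le_refl _)
      have hle : (pvCol xs nn col).length ≤ r := List.getElem?_eq_none_iff.mp h1
      have hlen : (pvCol xs nn col).length = r := by
        rcases r with _ | r'
        · omega
        · have hx : (r' + 1) * nn = r' * nn + nn := by ring
          have hlt : r' * nn + col < xs.length := by omega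
          have h2 := ih r'
          rw [List.getElem?_eq_getElem hlt] at h2
          have := (List.getElem?_eq_some_iff.mp h2).1
          omega
      subst hlen
      rw [if_pos hc, hi, List.getElem?_concat_length, List.getElem?_concat_length]
    · have hrhs : (xs ++ [w])[r * nn + col]? = none :=
        List.getElem?_eq_none (by simp; omega)
      rw [hrhs, List.getElem?_eq_none_iff]
      by_cases hc : (xs.length % nn == col) = true
      · rw [if_pos hc]
        have hmod : xs.length % nn = col := by simpa using hc
        have hq := Nat.div_add_mod xs.length nn
        set q := xs.length / nn with hqdef
        have hcm : nn * q = q * nn := Nat.mul_comm nn q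
        have hlen : xs.length = q * nn + col := by omega
        have hrq : q < r := by
          by_contra hcon
          have : r * nn ≤ q * nn := Nat.mul_le_mul_right nn (Nat.le_of_not_lt hcon)
          omega
        have h1 : (pvCol xs nn col)[q]? = none := by
          rw [ih q, ← hlen]; exact List.getElem?_eq_none (Nat.le_refl _)
        have := List.getElem?_eq_none_iff.mp h1
        simp only [List.length_append, List.length_singleton]
        omega
      · rw [if_neg hc]
        have h1 : (pvCol xs nn col)[r]? = none := by
          rw [ih r]; exact List.getElem?_eq_none (by omega)
        have := List.getElem?_eq_none_iff.mp h1
        simpa using this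

lemma pvCol_length_le (xs : List (List (String × Int))) (nn col : Nat) :
    (pvCol xs nn col).length ≤ xs.length := by
  simp only [pvCol, List.length_map]
  exact le_trans (List.length_filter_le _ _) (by simp)

lemma pvF_append_singleton (xs : List (List (String × Int))) (w : List (String × Int)) (nn col : Nat) (period_id : Int) :
    pvF (xs ++ [w]) nn col period_id =
      (pvF xs nn col period_id).or
        (if xs.length % nn == col then (if pvMatch period_id w then some w else none) else none) := by
  simp only [pvF, pvCol_append_singleton, List.find?_append]
  congr 1
  by_cases h : xs.length % nn == col <;> simp [h, List.find?_singleton]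

lemma pvWhileA_eq_find (xs : List (List (String × Int))) (nn : Nat) (col : Nat)
    (hcol : col < nn) (period_id : Int) :
    ∀ (fuel round : Nat) (w : List (String × Int)),
      xs[round * nn + col]? = some w →
      (pvCol xs nn col).length ≤ round + fuel →
      pvWhileA xs (nn : Int) (col : Int) period_id w round fuel =
        ((pvCol xs nn col).drop round).find? (pvMatch period_id) := by
  intro fuel
  induction fuel with
  | zero =>
    intro round w hw hf
    exfalso
    have h1 := pvCol_getElem? xs nn col hcol round
    rw [hw] at h1
    have := (List.getElem?_eq_some_iff.mp h1).1
    omega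
  | succ fuel ih =>
    intro round w hw hf
    have hrl : round < (pvCol xs nn col).length := by
      have h1 := pvCol_getElem? xs nn col hcol round
      rw [hw] at h1
      exact (List.getElem?_eq_some_iff.mp h1).1
    have hdrop : (pvCol xs nn col).drop round =
        (pvCol xs nn col)[round] :: (pvCol xs nn col).drop (round + 1) :=
      List.drop_eq_getElem_cons hrl
    have hhead : (pvCol xs nn col)[round] = w := by
      have h1 := pvCol_getElem? xs nn col hcol round
      rw [hw, List.getElem?_eq_getElem hrl] at h1
      exact (Option.some_injective _ h1)
    show (if pvPeriod w period_id ≠ period_id then _ else some w) = _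
    by_cases hm : pvPeriod w period_id = period_id
    · rw [if_neg (by simpa using hm)]
      rw [hdrop, hhead, List.find?_cons_of_pos (by simp [pvMatch, hm])]
    · rw [if_pos (by simpa using hm)]
      have hidx : ((round : Int) + 1) * (nn : Int) + (col : Int) = (((round + 1) * nn + col : Nat) : Int) := by
        push_cast; ring
      rw [hidx, PySem.List.pyGet?_natCast]
      rw [hdrop, List.find?_cons_of_neg (by simp [pvMatch, hm, hhead])]
      cases hnext : xs[(round + 1) * nn + col]? with
      | none =>
        have h1 := pvCol_getElem? xs nn col hcol (round + 1)
        rw [hnext] at h1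
        have := List.getElem?_eq_none_iff.mp h1
        rw [List.drop_eq_nil_of_le (by omega)]
        simp
      | some w' =>
        exact ih (round + 1) w' hnext (by omega)

lemma pvFoldB_inv (nn : Nat) (hnn : 0 < nn) (period_id : Int) (m : Nat)
    (rest : List (List (String × Int))) :
    ∀ (seen : List (List (String × Int))) (res : List (Option (List (String × Int)))) (fil : List Bool),
      m = min (seen.length + rest.length) nn →
      res.length = m → fil.length = m →
      (∀ col, col < m → res[col]? = some (pvF seen nn col period_id) ∧
        fil[col]? = some (pvF seen nn col period_id).isSome) →
      ((PySem.List.enumerate rest (seen.length : Int)).foldl (pvStepB (nn : Int) period_id) (res, fil)).1.length = m ∧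
      ∀ col, col < m →
        ((PySem.List.enumerate rest (seen.length : Int)).foldl (pvStepB (nn : Int) period_id) (res, fil)).1[col]? =
          some (pvF (seen ++ rest) nn col period_id) := by
  induction rest with
  | nil =>
    intro seen res fil hm hres hfil hinv
    simp only [PySem.List.enumerate_nil, List.foldl_nil, List.append_nil]
    exact ⟨hres, fun col hc => (hinv col hc).1⟩
  | cons w rest ih =>
    intro seen res fil hm hres hfil hinv
    rw [PySem.List.enumerate_cons, List.foldl_cons]
    set col0 := seen.length % nn with hcol0
    have hc0nn : col0 < nn := Nat.mod_lt _ hnn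
    have hc0le : col0 ≤ seen.length := Nat.mod_le _ _
    have hpos : 0 < (w :: rest).length := by simp
    have hc0m : col0 < m := by omega
    have hstep : pvStepB (nn : Int) period_id (res, fil) ((seen.length : Int), w) =
        (if fil.getD col0 false = false ∧ pvPeriod w period_id = period_id then
          (res.set col0 (some w), fil.set col0 true) else (res, fil)) := by
      simp only [pvStepB, PySem.Int.mod_natCast, Int.toNat_natCast, hcol0]
    have hfilv : fil.getD col0 false = (pvF seen nn col0 period_id).isSome := by
      rw [List.getD_eq_getElem?_getD, (hinv col0 hc0m).2]
      rfl
    have hFapp : ∀ col, col < m →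
        pvF (seen ++ [w]) nn col period_id =
          (pvF seen nn col period_id).or
            (if seen.length % nn == col then (if pvMatch period_id w then some w else none) else none) :=
      fun col _ => pvF_append_singleton seen w nn col period_id
    have hlen' : (seen ++ [w]).length = seen.length + 1 := by simp
    have hcast : (seen.length : Int) + 1 = (((seen ++ [w]).length : Nat) : Int) := by
      rw [hlen']; push_cast; ring
    have hclen : (w :: rest).length = rest.length + 1 := by simp
    rw [show seen ++ w :: rest = (seen ++ [w]) ++ rest by simp]
    by_cases hcond : fil.getD col0 false = false ∧ pvPeriod w period_id = period_id
    · rw [hstep, if_pos hcond, hcast]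
      apply ih (seen ++ [w]) (res.set col0 (some w)) (fil.set col0 true)
      · rw [hlen']; omega
      · simp [hres]
      · simp [hfil]
      · intro col hc
        rw [hFapp col hc]
        rcases hinv col hc with ⟨h1, h2⟩
        by_cases he : col0 = col
        · subst he
          have hnone : pvF seen nn col0 period_id = none := by
            cases hv : pvF seen nn col0 period_id with
            | none => rfl
            | some v => rw [hfilv, hv] at hcond; simp at hcond
          have hmw : pvMatch period_id w = true := by
            simp [pvMatch, hcond.2]
          constructor
          · rw [List.getElem?_set, if_pos rfl, if_pos (by omega), hnone, hmw]
            simp [hcol0]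
          · rw [List.getElem?_set, if_pos rfl, if_pos (by omega), hnone, hmw]
            simp [hcol0]
        · have hne : ¬ (seen.length % nn == col) = true := by
            simp [← hcol0]; omega
          constructor
          · rw [List.getElem?_set, if_neg he, h1, if_neg hne]
            simp
          · rw [List.getElem?_set, if_neg he, h2, if_neg hne]
            simp
    · rw [hstep, if_neg hcond, hcast]
      apply ih (seen ++ [w]) res fil
      · rw [hlen']; omega
      · exact hres
      · exact hfil
      · intro col hc
        rw [hFapp col hc]
        rcases hinv col hc with ⟨h1, h2⟩
        by_cases he : col0 = col
        · subst he
          have : ¬ (fil.getD col0 false = false) ∨ ¬ (pvPeriod w period_id = period_id) := by tauto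
          rcases this with hfl | hnm
          · have hsome : (pvF seen nn col0 period_id).isSome = true := by
              rw [hfilv] at hfl
              cases h : (pvF seen nn col0 period_id).isSome with
              | true => rfl
              | false => exact absurd h hfl
            rcases Option.isSome_iff_exists.mp hsome with ⟨v, hv⟩
            rw [h1, h2, hv]
            simp
          · have hmw : pvMatch period_id w = false := by
              simp [pvMatch]; exact hnm
            rw [h1, h2, hmw]
            simp [hcol0]
        · have hne : ¬ (seen.length % nn == col) = true := by
            simp [← hcol0]; omega
          rw [h1, h2, if_neg hne]
          simp

lemma pvA_eq (xs : List (List (String × Int))) (n period_id : Int) (hn : 0 < n) :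
    get_weekday_pattern_candidate xs n period_id =
      (List.range (min xs.length n.toNat)).map (fun col => pvF xs n.toNat col period_id) := by
  have hnncast : ((n.toNat : Nat) : Int) = n := Int.toNat_of_nonneg (le_of_lt hn)
  have hnnpos : 0 < n.toNat := by omega
  unfold get_weekday_pattern_candidate
  show List.foldl
      (fun weeks_to_return p => weeks_to_return ++ [pvWhileA xs n p.1 period_id p.2 0 (xs.length + 1)]) []
      (PySem.List.enumerate (PySem.List.slice xs (some 0) (some n)))
    = (List.range (min xs.length n.toNat)).map (fun col => pvF xs n.toNat col period_id)
  simp only [PySem.List.foldl_append_singleton_eq_map, List.nil_append]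
  have hfirst : PySem.List.slice xs (some 0) (some n) = xs.take n.toNat := by
    rw [PySem.List.slice_zero_start, PySem.List.slice_to xs (le_of_lt hn)]
  rw [hfirst]
  apply List.ext_getElem?
  intro col
  by_cases hc : col < min xs.length n.toNat
  · have hcx : col < xs.length := by omega
    have hcn : col < n.toNat := by omega
    rw [List.getElem?_map, List.getElem?_map, PySem.List.getElem?_enumerate]
    rw [List.getElem?_take_of_lt hcn, List.getElem?_range hc,
      List.getElem?_eq_getElem hcx]
    simp only [Option.map_some]
    congr 1
    have hw : xs[0 * n.toNat + col]? = some xs[col] := by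
      rw [Nat.zero_mul, Nat.zero_add]; exact List.getElem?_eq_getElem hcx
    have hres := pvWhileA_eq_find xs n.toNat col hcn period_id (xs.length + 1) 0 xs[col] hw
      (by have := pvCol_length_le xs n.toNat col; omega)
    rw [← hnncast]
    have hidx : ((0 : Int) + (col : Nat)) = ((col : Nat) : Int) := by ring
    rw [hidx, hres, List.drop_zero]
    rfl
  · have h1 : ((PySem.List.enumerate (xs.take n.toNat)).map
        (fun p => pvWhileA xs n p.1 period_id p.2 0 (xs.length + 1)))[col]? = none := by
      rw [List.getElem?_eq_none]
      simp only [List.length_map, PySem.List.length_enumerate, List.length_take]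
      omega
    have h2 : ((List.range (min xs.length n.toNat)).map
        (fun col => pvF xs n.toNat col period_id))[col]? = none := by
      rw [List.getElem?_eq_none]
      simp only [List.length_map, List.length_range]
      omega
    rw [h1, h2]

lemma pvB_eq (xs : List (List (String × Int))) (n period_id : Int) (hn : 0 < n) :
    get_weekday_pattern_candidate_alt xs n period_id =
      (List.range (min xs.length n.toNat)).map (fun col => pvF xs n.toNat col period_id) := by
  have hnncast : ((n.toNat : Nat) : Int) = n := Int.toNat_of_nonneg (le_of_lt hn)
  have hnnpos : 0 < n.toNat := by omega
  unfold get_weekday_pattern_candidate_alt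
  show (if n ≤ 0 then ([] : List (Option (List (String × Int)))) else
      ((PySem.List.enumerate xs).foldl (pvStepB n period_id)
        (List.replicate (min xs.length n.toNat) none,
         List.replicate (min xs.length n.toNat) false)).1)
    = (List.range (min xs.length n.toNat)).map (fun col => pvF xs n.toNat col period_id)
  rw [if_neg (by omega)]
  have hinv := pvFoldB_inv n.toNat hnnpos period_id (min xs.length n.toNat) xs []
    (List.replicate (min xs.length n.toNat) none)
    (List.replicate (min xs.length n.toNat) false)
    (by simp) List.length_replicate List.length_replicate
    (by
      intro col hc
      have hF : pvF [] n.toNat col period_id = none := by simp [pvF, pvCol]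
      constructor
      · rw [List.getElem?_replicate, if_pos hc, hF]
      · rw [List.getElem?_replicate, if_pos hc, hF]; rfl)
  rw [hnncast] at hinv
  simp only [List.length_nil, Nat.cast_zero, List.nil_append] at hinv
  rcases hinv with ⟨hlen, helem⟩
  apply List.ext_getElem?
  intro col
  by_cases hc : col < min xs.length n.toNat
  · rw [helem col hc, List.getElem?_map, List.getElem?_range hc]; rfl
  · have h2 : ((List.range (min xs.length n.toNat)).map
        (fun col => pvF xs n.toNat col period_id))[col]? = none := by
      rw [List.getElem?_eq_none]; simp only [List.length_map, List.length_range]; omega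
    rw [List.getElem?_eq_none (by omega), h2]

-- ===== VERDICT (by name: the statement is the Claim_ definition above) =====
theorem get_weekday_pattern_candidate_spec : Claim_equal_get_weekday_pattern_candidate := by
  intro xs n period_id _ hpre
  unfold Spec_get_weekday_pattern_candidate
  rcases hpre with ⟨hn, -⟩ | ⟨hneg, hempty⟩
  · rcases lt_or_eq_of_le hn with hpos | hzero
    · rw [pvA_eq xs n period_id hpos, pvB_eq xs n period_id hpos]
    · subst hzero
      simp [get_weekday_pattern_candidate, get_weekday_pattern_candidate_alt,
        PySem.List.slice]
  · have hslice : PySem.List.slice xs (some 0) (some n) = [] := by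
      simp only [PySem.List.slice_zero_start]
      simp only [PySem.List.slice, PySem.List.clampIdx]
      split_ifs <;> simp_all
    simp [get_weekday_pattern_candidate, get_weekday_pattern_candidate_alt, hslice,
      le_of_lt hneg]
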